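-- pv_equiv track=rewrite | github.com/escape0707/usaco_trainings | runround.py | next_runround
-- ===== SOURCE A (Python) =====
-- from typing import Any, Set, List
--
-- def next_runround(M: int, length: int) -> int:
--     digit_collection: List[int] = []
--     digit_set: Set[int] = set()
--
--     def check_runround() -> bool:
--         i = (0 + digit_collection[0]) % length
--         for cnt in range(1, length):
--             if i == 0:
--                 return False
--             i = (i + digit_collection[i]) % length
--         return i == 0
--
--     def convert_to_int() -> int:
--         return int("".join(map(str, digit_collection)))
--
--     def dfs(depth: int = 0) -> bool:
--         if depth == length:
--             return check_runround() and convert_to_int() > M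
--         for digit in range(1, 10):
--             if digit in digit_set:
--                 continue
--             digit_collection.append(digit)
--             digit_set.add(digit)
--             if dfs(depth + 1):
--                 return True
--             digit_set.discard(digit)
--             digit_collection.pop()
--         return False
--
--     if dfs():
--         return convert_to_int()
--     return 0
-- ===== SOURCE B (Python) =====
-- def next_runround(M: int, length: int) -> int:
--     # Level-wise generation: build all distinct-nonzero-digit tuples of the
--     # given length in increasing order, then scan for the first runround > M.
--     if length < 1 or length > 9:
--         return 0
--
--     def runround(c):
--         n = len(c)
--         i = c[0] % n
--         for _ in range(n - 1):
--             if i == 0: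
--                 return False
--             i = (i + c[i]) % n
--         return i == 0
--
--     cands = [[]]
--     for _ in range(length):
--         cands = [c + [d] for c in cands for d in range(1, 10) if d not in c]
--     for c in cands:
--         if runround(c):
--             v = int("".join(map(str, c)))
--             if v > M:
--                 return v
--     return 0
-- ===== Notes on version B (the rewrite author's own statement) =====
-- stated objective: alternative
-- what changed: Replaces A's recursive backtracking DFS over a mutable digit list and set by an iterative level-wise generation of all distinct-nonzero-digit candidate lists followed by one linear scan for the first runround value exceeding M; a guard returns 0 directly for lengths outside 1..9 instead of exhausting the search tree.
-- outside the precondition, e.g. on next_runround(5, 0): A raises IndexError, B returns 0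
import Mathlib
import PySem

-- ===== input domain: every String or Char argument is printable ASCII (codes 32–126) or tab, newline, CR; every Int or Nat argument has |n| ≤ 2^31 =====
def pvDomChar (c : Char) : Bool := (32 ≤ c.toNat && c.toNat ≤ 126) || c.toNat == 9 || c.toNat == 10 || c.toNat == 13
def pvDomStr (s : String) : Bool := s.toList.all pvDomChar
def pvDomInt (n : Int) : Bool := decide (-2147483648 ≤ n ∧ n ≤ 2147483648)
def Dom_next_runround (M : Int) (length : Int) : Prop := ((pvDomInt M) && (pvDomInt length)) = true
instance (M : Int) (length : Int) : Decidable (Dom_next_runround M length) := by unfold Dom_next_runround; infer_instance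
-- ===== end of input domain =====

-- B replaces A's recursive backtracking DFS (mutable list + set, restore on return) by an
-- iterative level-wise generation of all distinct-digit candidates followed by one linear scan
-- (objective: alternative decomposition, same results; return-value equivalence only — A mutates
-- only its own locals, so no caller-visible side effects are involved).

-- ===== PORT A =====
-- convert_to_int(): int("".join(map(str, digit_collection))); .getD 0 is unreachable
-- under Pre_ (digit_collection is nonempty, so the parse always succeeds)
def pvConvA (coll : List Int) : Int :=
  (PySem.Int.ofStr? (PySem.Str.join "" (coll.map PySem.Int.toStr))).getD 0

-- check_runround(): early "return False" is carried as Sum.inl; digit_collection[i] is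
-- pyGetD with default 0 — at every call site 0 ≤ i < length = |digit_collection|, in range
def pvCheckA (coll : List Int) (length : Int) : Bool :=
  let i0 := PySem.Int.mod (0 + PySem.List.pyGetD coll 0 0) length
  match (PySem.List.pyRange 1 length 1).foldl
      (fun st _ => match st with
        | Sum.inl b => Sum.inl b
        | Sum.inr i =>
          if i = 0 then Sum.inl false
          else Sum.inr (PySem.Int.mod (i + PySem.List.pyGetD coll i 0) length)) (Sum.inr i0) with
  | Sum.inl b => b
  | Sum.inr i => decide (i = 0)

-- dfs(): the two mutable nonlocals digit_collection / digit_set are threaded as state and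
-- returned alongside the Bool; fuel ≥ 10 is never exhausted (each call appends one of the
-- nine distinct digits, so the recursion depth is at most 10)
mutual
def pvDfsA (M : Int) (length : Int) : Nat → Int → List Int → PySem.Set Int → Bool × List Int × PySem.Set Int
  | 0, _, coll, st => (false, coll, st)  -- fuel guard, unreachable
  | fuel+1, depth, coll, st =>
    if depth = length then
      (pvCheckA coll length && decide (pvConvA coll > M), coll, st)
    else
      pvDfsLoopA M length fuel depth (PySem.List.pyRange 1 10 1) coll st
  termination_by fuel => (fuel + 1, 0)

def pvDfsLoopA (M : Int) (length : Int) (fuel : Nat) (depth : Int) : List Int → List Int → PySem.Set Int → Bool × List Int × PySem.Set Int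
  | [], coll, st => (false, coll, st)
  | d :: ds, coll, st =>
    if PySem.Set.contains st d then pvDfsLoopA M length fuel depth ds coll st
    else
      let r := pvDfsA M length fuel (depth + 1) (coll ++ [d]) (PySem.Set.add st d)
      if r.1 then r
      else
        -- digit_set.discard(digit); digit_collection.pop() — pop() on a nonempty list
        pvDfsLoopA M length fuel depth ds
          (((PySem.List.pop? r.2.1).map (·.2)).getD r.2.1)
          (PySem.Set.discard r.2.2 d)
  termination_by ds => (fuel + 1, ds.length)
end

def next_runround (M : Int) (length : Int) : Int :=
  let r := pvDfsA M length 10 0 [] PySem.Set.empty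
  if r.1 then pvConvA r.2.1 else 0

-- ===== PORT B =====
def pvRunroundB (c : List Int) : Bool :=
  let n := PySem.List.len c
  let i0 := PySem.Int.mod (PySem.List.pyGetD c 0 0) n
  match (PySem.List.pyRange 0 (n - 1) 1).foldl
      (fun st _ => match st with
        | Sum.inl b => Sum.inl b
        | Sum.inr i =>
          if i = 0 then Sum.inl false
          else Sum.inr (PySem.Int.mod (i + PySem.List.pyGetD c i 0) n)) (Sum.inr i0) with
  | Sum.inl b => b
  | Sum.inr i => decide (i = 0)

-- one level of [c + [d] for c in cands for d in range(1, 10) if d not in c]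
def pvExtendB (cands : List (List Int)) : List (List Int) :=
  cands.flatMap (fun c =>
    ((PySem.List.pyRange 1 10 1).filter (fun d => !(c.contains d))).map (fun d => c ++ [d]))

def pvScanB (M : Int) : List (List Int) → Int
  | [] => 0
  | c :: cs =>
    if pvRunroundB c then
      let v := (PySem.Int.ofStr? (PySem.Str.join "" (c.map PySem.Int.toStr))).getD 0
      if v > M then v else pvScanB M cs
    else pvScanB M cs

def next_runround_alt (M : Int) (length : Int) : Int :=
  if length < 1 ∨ length > 9 then 0
  else pvScanB M ((PySem.List.pyRange 0 length 1).foldl (fun cs _ => pvExtendB cs) [[]])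

-- ===== PRECONDITION & SPEC =====
-- Pre_ excludes only length == 0, where A raises IndexError (check_runround reads
-- digit_collection[0] from the empty list before any digit was placed).
def Pre_next_runround (M : Int) (length : Int) : Prop := length ≠ 0
instance (M : Int) (length : Int) : Decidable (Pre_next_runround M length) := by
  unfold Pre_next_runround; infer_instance

def pvWitness_next_runround : Int × Int := (0, 1)

def Spec_next_runround (M : Int) (length : Int) (out : Int) : Prop := out = next_runround_alt M length
instance (M : Int) (length : Int) (out : Int) : Decidable (Spec_next_runround M length out) := by
  unfold Spec_next_runround; infer_instance

-- ===== CLAIM (what is proved, stated in full; the proofs are below) =====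
def Claim_equal_next_runround : Prop := ∀ (M : Int) (length : Int), Dom_next_runround M length → Pre_next_runround M length → Spec_next_runround M length (next_runround M length)

-- ===== LEMMAS AND PROOFS =====

-- the leaf predicate both programs test
def pvPred (M L : Int) (c : List Int) : Bool := pvCheckA c L && decide (pvConvA c > M)

-- the leaves of A's DFS subtree below prefix `coll`, in A's visiting order
def pvLeaves (L : Int) (coll : List Int) : List (List Int) :=
  if (coll.length : Int) ≤ L then pvExtendB^[(L - (coll.length : Int)).toNat] [coll] else []

-- invariant carried by A's recursion
def pvInv (coll : List Int) (st : PySem.Set Int) : Prop :=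
  coll.Nodup ∧ (∀ x ∈ coll, x ∈ PySem.List.pyRange 1 10 1) ∧ (∀ x, x ∈ st ↔ x ∈ coll)

-- what (bool, coll, set) A returns, phrased against find? over the leaf list
def pvOutcome (coll : List Int) (st : PySem.Set Int)
    (r : Bool × List Int × PySem.Set Int) (o : Option (List Int)) : Prop :=
  match o with
  | some c => r.1 = true ∧ r.2.1 = c
  | none => r = (false, coll, st)

theorem pvFoldlConst {α β : Type} (g : β → β) (l : List α) (init : β) :
    l.foldl (fun s _ => g s) init = g^[l.length] init := by
  induction l generalizing init with
  | nil => rfl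
  | cons x xs ih => simp [List.foldl_cons, ih, Function.iterate_succ_apply]

theorem pvExtend_append (as bs : List (List Int)) :
    pvExtendB (as ++ bs) = pvExtendB as ++ pvExtendB bs := by
  simp [pvExtendB]

theorem pvExtend_iterate_append (k : Nat) (as bs : List (List Int)) :
    pvExtendB^[k] (as ++ bs) = pvExtendB^[k] as ++ pvExtendB^[k] bs := by
  induction k generalizing as bs with
  | zero => rfl
  | succ k ih => simp [Function.iterate_succ_apply, pvExtend_append, ih]

theorem pvExtend_iterate_nil (k : Nat) : pvExtendB^[k] [] = [] := by
  induction k with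
  | zero => rfl
  | succ k ih => simpa [Function.iterate_succ_apply, pvExtendB] using ih

theorem pvExtend_iterate_map (k : Nat) (g : Int → List Int) (l : List Int) :
    pvExtendB^[k] (l.map g) = l.flatMap (fun d => pvExtendB^[k] [g d]) := by
  induction l with
  | nil => simpa using pvExtend_iterate_nil k
  | cons d l ih =>
    have : (d :: l).map g = [g d] ++ l.map g := by simp
    rw [this, pvExtend_iterate_append, ih]; simp

theorem pvLeaves_len (k : Nat) (coll : List Int) :
    ∀ c ∈ pvExtendB^[k] [coll], c.length = coll.length + k := by
  induction k generalizing coll with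
  | zero => intro c hc; simp at hc; simp [hc]
  | succ k ih =>
    intro c hc
    rw [Function.iterate_succ_apply] at hc
    simp only [pvExtendB, List.flatMap_cons, List.flatMap_nil, List.append_nil] at hc
    rw [pvExtend_iterate_map] at hc
    simp only [List.mem_flatMap] at hc
    obtain ⟨d, _, hc⟩ := hc
    have := ih (coll ++ [d]) c hc
    simp at this
    omega

-- a Nodup list of digits 1..9 has at most nine elements
theorem pvLen_le_nine (coll : List Int) (hnd : coll.Nodup)
    (hr : ∀ x ∈ coll, x ∈ PySem.List.pyRange 1 10 1) : coll.length ≤ 9 := by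
  have h := (hnd.subperm (fun x hx => hr x hx)).length_le
  simpa using h

-- if coll already has nine digits it contains every digit 1..9
theorem pvFull (coll : List Int) (hnd : coll.Nodup)
    (hr : ∀ x ∈ coll, x ∈ PySem.List.pyRange 1 10 1) (hlen : coll.length = 9) :
    ∀ d ∈ PySem.List.pyRange 1 10 1, d ∈ coll := by
  have hsp := hnd.subperm (fun x hx => hr x hx)
  have hperm : coll.Perm (PySem.List.pyRange 1 10 1) := by
    apply hsp.perm_of_length_le
    simp [PySem.List.length_pyRange_one, hlen]
  intro d hd
  exact hperm.mem_iff.mpr hd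

-- above nine levels the subtree has no leaves
theorem pvLeaves_nil_of_deep (k : Nat) :
    ∀ (coll : List Int), coll.Nodup → (∀ x ∈ coll, x ∈ PySem.List.pyRange 1 10 1) →
    9 < coll.length + k → pvExtendB^[k] [coll] = [] := by
  induction k with
  | zero =>
    intro coll hnd hr h
    exact absurd (pvLen_le_nine coll hnd hr) (by omega)
  | succ k ih =>
    intro coll hnd hr h
    rw [Function.iterate_succ_apply]
    simp only [pvExtendB, List.flatMap_cons, List.flatMap_nil, List.append_nil]
    rw [pvExtend_iterate_map]
    apply List.flatMap_eq_nil_iff.mpr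
    intro d hd
    have hd' := List.mem_filter.mp hd
    have hdnc : d ∉ coll := by simpa using hd'.2
    apply ih (coll ++ [d])
    · simp [List.nodup_append, hnd]
      intro a ha had
      exact hdnc (had ▸ ha)
    · intro x hx
      rcases List.mem_append.mp hx with hx | hx
      · exact hr x hx
      · simp at hx; subst hx; exact hd'.1
    · simp; omega

theorem pvCheck_eq (c : List Int) (L : Int) (hL : 1 ≤ L) (hlen : c.length = L.toNat) :
    pvCheckA c L = pvRunroundB c := by
  have hlen' : PySem.List.len c = L := by simp [PySem.List.len, hlen]; omega
  simp only [pvCheckA, pvRunroundB, hlen', zero_add]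
  rw [pvFoldlConst, pvFoldlConst]
  simp [PySem.List.length_pyRange_one]

theorem pvScan_eq_find (M : Int) (L : Int) (hL : 1 ≤ L) :
    ∀ cs : List (List Int), (∀ c ∈ cs, c.length = L.toNat) →
    pvScanB M cs = (match cs.find? (pvPred M L) with
      | some c => pvConvA c
      | none => 0) := by
  intro cs
  induction cs with
  | nil => intro _; rfl
  | cons c cs ih =>
    intro hlen
    have hc := pvCheck_eq c L hL (hlen c (by simp))
    have htail := ih (fun x hx => hlen x (by simp [hx]))
    by_cases hr : pvRunroundB c = true
    · by_cases hv : pvConvA c > M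
      · have hp : pvPred M L c = true := by simp [pvPred, hc, hr]; omega
        simp only [pvScanB, hr, if_true, List.find?_cons, hp]
        rw [show (PySem.Int.ofStr? (PySem.Str.join "" (List.map PySem.Int.toStr c))).getD 0 = pvConvA c from rfl]
        rw [if_pos hv, pvConvA]
      · have hp : pvPred M L c = false := by simp [pvPred]; intro _; omega
        simp only [pvScanB, hr, if_true, List.find?_cons, hp]
        rw [show (PySem.Int.ofStr? (PySem.Str.join "" (List.map PySem.Int.toStr c))).getD 0 = pvConvA c from rfl]
        rw [if_neg hv]
        exact htail
    · have hp : pvPred M L c = false := by simp [pvPred, hc]; simp at hr; simp [hr]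
      simp only [pvScanB, hr, if_false, List.find?_cons, hp]
      exact htail

-- A's check and B's check agree on lists of the right length
-- unfolding pvLeaves one level below a non-leaf prefix
theorem pvLeaves_unfold (L : Int) (coll : List Int) (h : (coll.length : Int) ≠ L) :
    pvLeaves L coll = ((PySem.List.pyRange 1 10 1).filter (fun d => !(coll.contains d))).flatMap
      (fun d => pvLeaves L (coll ++ [d])) := by
  by_cases hle : (coll.length : Int) ≤ L
  · have hlt : (coll.length : Int) < L := lt_of_le_of_ne hle h
    have hk : (L - (coll.length : Int)).toNat = (L - (coll.length : Int) - 1).toNat + 1 := by omega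
    unfold pvLeaves
    rw [if_pos hle, hk, Function.iterate_succ_apply]
    have hext : pvExtendB [coll] = ((PySem.List.pyRange 1 10 1).filter
        (fun d => !(coll.contains d))).map (fun d => coll ++ [d]) := by
      simp [pvExtendB]
    rw [hext, pvExtend_iterate_map]
    have hchild : ∀ d : Int, (if ((coll ++ [d]).length : Int) ≤ L
        then pvExtendB^[(L - ((coll ++ [d]).length : Int)).toNat] [coll ++ [d]] else [])
        = pvExtendB^[(L - (coll.length : Int) - 1).toNat] [coll ++ [d]] := by
      intro d
      rw [if_pos (by simp; omega)]
      congr 2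
      simp
      omega
    simp only [hchild]
  · unfold pvLeaves
    rw [if_neg hle]
    symm
    apply List.flatMap_eq_nil_iff.mpr
    intro d _
    rw [if_neg (by simp; omega)]

-- the inner for-loop of dfs, against the flattened leaf lists of the remaining children
theorem pvLoop_eq (M L : Int) (fuel : Nat)
    (IH : ∀ (coll : List Int) (st : PySem.Set Int), pvInv coll st → 10 - coll.length ≤ fuel →
      pvOutcome coll st (pvDfsA M L fuel (coll.length : Int) coll st)
        ((pvLeaves L coll).find? (pvPred M L))) :
    ∀ (ds coll : List Int) (st : PySem.Set Int), pvInv coll st →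
      (∀ x ∈ ds, x ∈ PySem.List.pyRange 1 10 1) →
      9 - coll.length ≤ fuel →
      pvOutcome coll st (pvDfsLoopA M L fuel (coll.length : Int) ds coll st)
        (((ds.filter (fun d => !(coll.contains d))).flatMap
          (fun d => pvLeaves L (coll ++ [d]))).find? (pvPred M L)) := by
  intro ds
  induction ds with
  | nil => intro coll st hinv hds hf; simp [pvDfsLoopA, pvOutcome]
  | cons d ds ih =>
    intro coll st hinv hds hf
    obtain ⟨hnd, hrange, hmem⟩ := hinv
    by_cases hd : d ∈ coll
    · have hcont : PySem.Set.contains st d = true := (PySem.Set.contains_iff st d).mpr ((hmem d).mpr hd)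
      have hfil : (d :: ds).filter (fun x => !(coll.contains x)) = ds.filter (fun x => !(coll.contains x)) := by
        simp [List.filter_cons, hd]
      rw [hfil]
      rw [show pvDfsLoopA M L fuel (coll.length : Int) (d :: ds) coll st
            = pvDfsLoopA M L fuel (coll.length : Int) ds coll st from by
        have hmem' : d ∈ st := (PySem.Set.contains_iff st d).mp hcont
        simp [pvDfsLoopA]
        intro h
        exact absurd hmem' h]
      exact ih coll st ⟨hnd, hrange, hmem⟩ (fun x hx => hds x (by simp [hx])) hf
    · have hdst : d ∉ st := fun hin => hd ((hmem d).mp hin)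
      have hcont : PySem.Set.contains st d = false := by
        rw [Bool.eq_false_iff]
        intro hc
        exact hdst ((PySem.Set.contains_iff st d).mp hc)
      have hlen9 : coll.length ≤ 8 := by
        by_contra hlen
        have h9 : coll.length = 9 := le_antisymm (pvLen_le_nine coll hnd hrange) (by omega)
        exact hd (pvFull coll hnd hrange h9 d (hds d (by simp)))
      have hinv' : pvInv (coll ++ [d]) (PySem.Set.add st d) := by
        refine ⟨?_, ?_, ?_⟩
        · simp [List.nodup_append, hnd]
          intro a ha had
          exact hd (had ▸ ha)
        · intro x hx
          rcases List.mem_append.mp hx with hx | hx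
          · exact hrange x hx
          · simp at hx; subst hx; exact hds _ (by simp)
        · intro x
          rw [PySem.Set.mem_add]
          constructor
          · rintro (hx | rfl)
            · exact List.mem_append.mpr (Or.inl ((hmem x).mp hx))
            · simp
          · intro hx
            rcases List.mem_append.mp hx with hx | hx
            · exact Or.inl ((hmem x).mpr hx)
            · simp at hx; exact Or.inr hx
      have hcast : (((coll ++ [d]).length : Nat) : Int) = (coll.length : Int) + 1 := by simp
      have hout := IH (coll ++ [d]) (PySem.Set.add st d) hinv' (by simp; omega)
      have hfil : (d :: ds).filter (fun x => !(coll.contains x))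
          = d :: ds.filter (fun x => !(coll.contains x)) := by
        simp [List.filter_cons, hd]
      rw [hfil, List.flatMap_cons, List.find?_append]
      have hstep : pvDfsLoopA M L fuel (coll.length : Int) (d :: ds) coll st
          = (if (pvDfsA M L fuel ((coll.length : Int) + 1) (coll ++ [d]) (PySem.Set.add st d)).1 then
              pvDfsA M L fuel ((coll.length : Int) + 1) (coll ++ [d]) (PySem.Set.add st d)
            else
              pvDfsLoopA M L fuel (coll.length : Int) ds
                (((PySem.List.pop? (pvDfsA M L fuel ((coll.length : Int) + 1) (coll ++ [d]) (PySem.Set.add st d)).2.1).map (·.2)).getD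
                  (pvDfsA M L fuel ((coll.length : Int) + 1) (coll ++ [d]) (PySem.Set.add st d)).2.1)
                (PySem.Set.discard (pvDfsA M L fuel ((coll.length : Int) + 1) (coll ++ [d]) (PySem.Set.add st d)).2.2 d)) := by
        simp [pvDfsLoopA]
        intro h
        exact absurd h hdst
      rw [hcast] at hout
      rcases hfind : (pvLeaves L (coll ++ [d])).find? (pvPred M L) with _ | c
      · rw [hfind] at hout
        have hout' : pvDfsA M L fuel ((coll.length : Int) + 1) (coll ++ [d]) (PySem.Set.add st d)
            = (false, coll ++ [d], PySem.Set.add st d) := hout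
        rw [hstep, hout']
        simp only [Option.or_none, Option.none_or]
        have hpop : ((PySem.List.pop? ((coll ++ [d]) : List Int)).map (·.2)).getD (coll ++ [d]) = coll := by
          rw [PySem.List.pop?_last]
          rfl
        have hdisc : PySem.Set.discard (PySem.Set.add st d) d = st := by
          rw [PySem.Set.add_of_not_mem hdst]
          show List.filter _ (st ++ [d]) = st
          rw [List.filter_append]
          have h1 : List.filter (fun y => !y == d) [d] = [] := by simp
          have h2 : List.filter (fun y => !y == d) st = st := by
            apply List.filter_eq_self.mpr
            intro y hy
            simp only [Bool.not_eq_eq_eq_not, Bool.not_true, beq_eq_false_iff_ne, ne_eq]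
            intro hyd
            exact hd (hyd ▸ ((hmem y).mp hy))
          rw [h1, h2, List.append_nil]
        rw [if_neg (by simp), hpop, hdisc]
        exact ih coll st ⟨hnd, hrange, hmem⟩ (fun x hx => hds x (by simp [hx])) hf
      · rw [hfind] at hout
        obtain ⟨hb, hcoll⟩ := hout
        rw [hstep, hb]
        simp only [if_true]
        exact ⟨hb, hcoll⟩

-- the master correspondence: A's DFS from a prefix = first hit among that prefix's leaves
theorem pvDfs_eq (M L : Int) : ∀ (fuel : Nat) (coll : List Int) (st : PySem.Set Int),
    pvInv coll st → 10 - coll.length ≤ fuel →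
    pvOutcome coll st (pvDfsA M L fuel (coll.length : Int) coll st)
      ((pvLeaves L coll).find? (pvPred M L)) := by
  intro fuel
  induction fuel with
  | zero =>
    intro coll st hinv hf
    have := pvLen_le_nine coll hinv.1 hinv.2.1
    omega
  | succ fuel ih =>
    intro coll st hinv hf
    by_cases hdl : (coll.length : Int) = L
    · have hleaf : pvLeaves L coll = [coll] := by
        unfold pvLeaves
        rw [if_pos (le_of_eq hdl)]
        rw [show (L - (coll.length : Int)).toNat = 0 from by omega]
        rfl
      rw [hleaf]
      rw [show pvDfsA M L (fuel+1) (coll.length : Int) coll st = (pvPred M L coll, coll, st) from by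
        simp [pvDfsA, hdl, pvPred]]
      by_cases hp : pvPred M L coll = true
      · rw [List.find?_cons_of_pos hp]
        exact ⟨hp, rfl⟩
      · rw [List.find?_cons_of_neg (by simpa using hp), List.find?_nil]
        show (pvPred M L coll, coll, st) = (false, coll, st)
        simp [Bool.eq_false_iff.mpr hp]
    · rw [show pvDfsA M L (fuel+1) (coll.length : Int) coll st
            = pvDfsLoopA M L fuel (coll.length : Int) (PySem.List.pyRange 1 10 1) coll st from by
        simp [pvDfsA, hdl]]
      rw [pvLeaves_unfold L coll hdl]
      exact pvLoop_eq M L fuel ih (PySem.List.pyRange 1 10 1) coll st hinv (fun x hx => hx)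
        (by omega)

-- the master correspondence: A's DFS from a prefix = first hit among that prefix's leaves
-- ===== VERDICT (by name: the statement is the Claim_ definition above) =====
theorem next_runround_spec : Claim_equal_next_runround := by
  intro M L _ hpre
  unfold Spec_next_runround
  have hinv : pvInv [] PySem.Set.empty := ⟨List.nodup_nil, by simp, by simp [PySem.Set.empty]⟩
  have hout := pvDfs_eq M L 10 [] PySem.Set.empty hinv (by simp)
  unfold next_runround
  by_cases h1 : 1 ≤ L ∧ L ≤ 9
  · have halt : next_runround_alt M L = pvScanB M (pvExtendB^[L.toNat] [[]]) := by
      unfold next_runround_alt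
      rw [if_neg (by omega)]
      rw [pvFoldlConst]
      simp [PySem.List.length_pyRange_one]
    have hleaves : pvLeaves L [] = pvExtendB^[L.toNat] [[]] := by
      unfold pvLeaves
      rw [if_pos (by simp; omega)]
      simp
    rw [halt, pvScan_eq_find M L h1.1 _
      (fun c hc => by simpa using pvLeaves_len L.toNat [] c hc)]
    rw [hleaves] at hout
    rcases hfind : (pvExtendB^[L.toNat] [[]]).find? (pvPred M L) with _ | c
    · rw [hfind] at hout
      have : pvDfsA M L 10 ((([] : List Int).length : Int)) [] PySem.Set.empty
          = (false, [], PySem.Set.empty) := hout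
      simp only [List.length_nil, Nat.cast_zero] at this
      rw [this]
      rfl
    · rw [hfind] at hout
      obtain ⟨hb, hc⟩ := hout
      simp only [List.length_nil, Nat.cast_zero] at hb hc
      rw [if_pos hb, hc]
  · have hzero : next_runround_alt M L = 0 := by
      unfold next_runround_alt
      rw [if_pos (by omega)]
    have hnil : pvLeaves L [] = [] := by
      unfold pvLeaves
      by_cases h2 : (0 : Int) ≤ L
      · rw [if_pos (by simpa using h2)]
        apply pvLeaves_nil_of_deep
        · exact List.nodup_nil
        · simp
        · have : L ≠ 0 := hpre
          simp
          omega
      · rw [if_neg (by simpa using h2)]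
    rw [hnil, List.find?_nil] at hout
    have : pvDfsA M L 10 ((([] : List Int).length : Int)) [] PySem.Set.empty
        = (false, [], PySem.Set.empty) := hout
    simp only [List.length_nil, Nat.cast_zero] at this
    rw [hzero, this]
    rfl
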